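-- pv_equiv track=rewrite | github.com/sim-sangwoo/myBlog | app.py | removeSpacebarAndSign
-- ===== SOURCE A (Python) =====
-- def removeSpacebarAndSign(str):
--     strSpl=[]
--     result=""
--     strSpl = str.split()
--     for s in strSpl:
--         result+=s
--     if "(" in result:
--         result = result[:result.find("(")]
--     return result
-- ===== SOURCE B (Python) =====
-- def removeSpacebarAndSign(str):
--     out = []
--     for ch in str:
--         if ch == '(':
--             break
--         if not ch.isspace():
--             out.append(ch)
--     return ''.join(out)
-- ===== Notes on version B (the rewrite author's own statement) =====
-- stated objective: alternative
-- what changed: Replaces A's two passes (split()+concatenate, then a separate substring search and slice) with a single character-level loop that skips whitespace and stops at the first open parenthesis; same O(n), trades A's C-level built-ins for one explicit pass.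
import Mathlib
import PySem

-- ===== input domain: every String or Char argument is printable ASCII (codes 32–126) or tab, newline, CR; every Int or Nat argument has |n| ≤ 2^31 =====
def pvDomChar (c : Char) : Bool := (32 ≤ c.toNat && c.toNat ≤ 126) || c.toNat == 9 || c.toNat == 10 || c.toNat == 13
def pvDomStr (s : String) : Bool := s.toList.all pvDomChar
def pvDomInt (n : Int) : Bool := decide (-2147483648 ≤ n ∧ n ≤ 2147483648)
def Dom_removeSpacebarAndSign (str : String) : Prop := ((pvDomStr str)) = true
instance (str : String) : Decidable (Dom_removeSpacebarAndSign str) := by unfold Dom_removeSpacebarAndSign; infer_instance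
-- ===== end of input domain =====

-- B replaces A's two passes (split()+concatenate, then find-and-slice) with one character-level
-- loop that skips whitespace and stops at the first open parenthesis (alternative decomposition, same O(n)).

-- ===== PORT A =====
def removeSpacebarAndSign (str : String) : String :=
  let strSpl := PySem.Str.split₀ str
  let result := strSpl.foldl (fun r s => r ++ s) ""
  if PySem.Str.isIn "(" result then
    PySem.Str.slice result none (some (PySem.Str.find result "("))
  else result

-- ===== PORT B =====
-- the for-loop of Source B: break at '(', append non-whitespace chars to the accumulator
def removeSpacebarAndSignGo (cs : List Char) (out : List Char) : List Char :=
  match cs with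
  | [] => out
  | c :: rest =>
    if c == '(' then out
    else if PySem.Chars.isspace c then removeSpacebarAndSignGo rest out
    else removeSpacebarAndSignGo rest (out ++ [c])

def removeSpacebarAndSign_alt (str : String) : String :=
  String.ofList (removeSpacebarAndSignGo str.toList [])

-- ===== PRECONDITION & SPEC =====
def Spec_removeSpacebarAndSign (str : String) (out : String) : Prop := out = removeSpacebarAndSign_alt str
instance (str : String) (out : String) : Decidable (Spec_removeSpacebarAndSign str out) := by unfold Spec_removeSpacebarAndSign; infer_instance

-- ===== CLAIM (what is proved, stated in full; the proofs are below) =====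
def Claim_equal_removeSpacebarAndSign : Prop := ∀ (str : String), Dom_removeSpacebarAndSign str → Spec_removeSpacebarAndSign str (removeSpacebarAndSign str)

-- ===== LEMMAS AND PROOFS =====

-- the concatenation of the words of s.split() is s with all whitespace removed
lemma split₀_go_flatten (rest cur : List Char) (acc : List (List Char)) :
    (PySem.Chars.split₀.go rest cur acc).flatten
      = acc.reverse.flatten ++ cur.reverse ++ rest.filter (fun c => !PySem.Chars.isspace c) := by
  induction rest generalizing cur acc with
  | nil =>
    by_cases h : cur.isEmpty
    · simp [PySem.Chars.split₀.go, List.isEmpty_iff.mp h]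
    · simp [PySem.Chars.split₀.go, h]
  | cons c rest ih =>
    by_cases hs : PySem.Chars.isspace c
    · by_cases h : cur.isEmpty
      · simp [PySem.Chars.split₀.go, hs, ih, List.isEmpty_iff.mp h]
      · simp [PySem.Chars.split₀.go, hs, h, ih]
    · simp [PySem.Chars.split₀.go, hs, ih]

lemma split₀_flatten (cs : List Char) :
    (PySem.Chars.split₀ cs).flatten = cs.filter (fun c => !PySem.Chars.isspace c) := by
  simpa using split₀_go_flatten cs [] []

-- A's foldl concatenation, seen on code points
lemma foldl_append_toList (parts : List String) (acc : String) :
    (parts.foldl (fun r s => r ++ s) acc).toList = acc.toList ++ (parts.map String.toList).flatten := by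
  induction parts generalizing acc with
  | nil => simp
  | cons p ps ih => simp [List.foldl_cons, ih]

lemma singleton_prefix_iff (c : Char) (l : List Char) : [c] <+: l ↔ l.head? = some c := by
  cases l with
  | nil => simp
  | cons a t => simp [List.cons_prefix_cons, eq_comm]

-- take up to the first occurrence of '(' is takeWhile (≠ '(')
lemma take_firstIdx_eq_takeWhile (f : List Char) (k : Nat)
    (hk : f[k]? = some '(') (hmin : ∀ i < k, f[i]? ≠ some '(') :
    f.take k = f.takeWhile (fun c => !(c == '(')) := by
  induction f generalizing k with
  | nil => simp at hk
  | cons a t ih =>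
    cases k with
    | zero => simp_all
    | succ k =>
      have ha : ¬ (a = '(') := by
        intro h; exact hmin 0 (Nat.succ_pos _) (by simp [h])
      have : t.take k = t.takeWhile (fun c => !(c == '(')) := by
        apply ih k (by simpa using hk)
        intro i hi
        have := hmin (i + 1) (by omega)
        simpa using this
      simp [ha, this]

lemma takeWhile_eq_self_of_not_mem (f : List Char) (h : '(' ∉ f) :
    f.takeWhile (fun c => !(c == '(')) = f := by
  induction f with
  | nil => rfl
  | cons a t ih =>
    have ha : ¬ (a = '(') := fun hc => h (by simp [hc])
    simp [ha, ih (fun hc => h (List.mem_cons_of_mem _ hc))]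

-- A's truncation at the first '(' equals takeWhile
lemma truncate_eq_takeWhile (f : List Char) :
    (if PySem.Chars.isIn ['('] f then (PySem.List.slice f none (some (PySem.Chars.find f ['(']))) else f)
      = f.takeWhile (fun c => !(c == '(')) := by
  by_cases h : PySem.Chars.isIn ['('] f
  · have hinf : ['('] <:+: f := (PySem.Chars.isIn_iff_infix _ _).mp h
    have hpos : 0 ≤ PySem.Chars.find f ['('] := (PySem.Chars.find_nonneg_iff _ _).mpr hinf
    obtain ⟨h1, h2⟩ := PySem.Chars.find_spec hpos
    rw [if_pos h, PySem.List.slice_to _ hpos]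
    apply take_firstIdx_eq_takeWhile
    · rw [← List.head?_drop]
      rcases h1 with ⟨t, ht⟩
      rw [← ht]; simp
    · intro i hi hcontra
      exact h2 i hi ((singleton_prefix_iff _ _).mpr (by rw [List.head?_drop]; exact hcontra))
  · have hnm : '(' ∉ f := by
      intro hm
      obtain ⟨s, t, hst⟩ := List.append_of_mem hm
      exact h ((PySem.Chars.isIn_iff_infix _ _).mpr ⟨s, t, by simp [hst]⟩)
    rw [if_neg h, eq_comm]
    exact takeWhile_eq_self_of_not_mem f hnm

-- B's loop builds filter-inside-takeWhile
lemma removeSpacebarAndSignGo_spec (cs out : List Char) :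
    removeSpacebarAndSignGo cs out
      = out ++ (cs.takeWhile (fun c => !(c == '('))).filter (fun c => !PySem.Chars.isspace c) := by
  induction cs generalizing out with
  | nil => simp [removeSpacebarAndSignGo]
  | cons c rest ih =>
    by_cases hp : c = '('
    · simp [removeSpacebarAndSignGo, hp]
    · by_cases hs : PySem.Chars.isspace c
      · have : ¬ (PySem.Chars.isspace '(') := by decide
        simp [removeSpacebarAndSignGo, hp, hs, ih]
      · simp [removeSpacebarAndSignGo, hp, hs, ih]

-- filter and takeWhile-at-'(' commute (whitespace is never '(')
lemma takeWhile_filter_comm (cs : List Char) :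
    (cs.filter (fun c => !PySem.Chars.isspace c)).takeWhile (fun c => !(c == '('))
      = (cs.takeWhile (fun c => !(c == '('))).filter (fun c => !PySem.Chars.isspace c) := by
  induction cs with
  | nil => rfl
  | cons c rest ih =>
    by_cases hp : c = '('
    · have : ¬ (PySem.Chars.isspace '(') := by decide
      simp [hp, this]
    · by_cases hs : PySem.Chars.isspace c
      · simp [hs, hp, ih]
      · simp [hs, hp, ih]

-- ===== VERDICT (by name: the statement is the Claim_ definition above) =====
theorem removeSpacebarAndSign_spec : Claim_equal_removeSpacebarAndSign := by
  intro str _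
  unfold Spec_removeSpacebarAndSign removeSpacebarAndSign removeSpacebarAndSign_alt
  apply String.toList_inj.mp
  rw [removeSpacebarAndSignGo_spec]
  have hres : ((PySem.Str.split₀ str).foldl (fun r s => r ++ s) "").toList
      = str.toList.filter (fun c => !PySem.Chars.isspace c) := by
    rw [foldl_append_toList, PySem.Str.split₀_map_toList, split₀_flatten]; simp
  have htr := truncate_eq_takeWhile (str.toList.filter (fun c => !PySem.Chars.isspace c))
  by_cases h : PySem.Str.isIn "(" ((PySem.Str.split₀ str).foldl (fun r s => r ++ s) "") = true
  · rw [if_pos h]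
    rw [PySem.Str.isIn_eq, hres] at h
    rw [if_pos (by simpa using h)] at htr
    rw [PySem.Str.toList_slice, PySem.Str.find_eq]
    simp only [PySem.Chars.slice_eq_listSlice]
    rw [hres, show ("(" : String).toList = ['('] from rfl, htr, takeWhile_filter_comm]
    simp
  · rw [if_neg h]
    rw [PySem.Str.isIn_eq, hres] at h
    rw [if_neg (by simpa using h)] at htr
    rw [hres, htr, takeWhile_filter_comm]
    simp
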